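-- pv_equiv track=rewrite | github.com/young0264/hellopycharm | 2024_토스_상반기_서버/2번.py | solution
-- ===== SOURCE A (Python) =====
-- def solution(s):
--     answer = 0
--
--     def is_same_3chars(arr, start):
--         if arr[start] == arr[start + 1] == arr[start + 2]:
--             return True
--         return False
--
--     arr = []
--     arr_s = list(s)
--
--     for i in range(0, len(s) - 2):
--         if is_same_3chars(arr_s, i):
--             arr.append(arr_s[i:i + 3])
--
--     if(len(arr) == 0): # 멋쟁이 수가 없을 때
--         return -1
--
--     for i in range(len(arr)):
--         answer = max(answer, int(''.join(arr[i])))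
--
--     if(answer == 0): # 멋쟁이 수가 000 일 때
--         return 0
--     return answer
-- ===== SOURCE B (Python) =====
-- def solution(s):
--     # One-pass scan keeping the two previous characters; no window list, no second pass.
--     best = None
--     p2 = p1 = None
--     for ch in s:
--         if p2 == p1 == ch:
--             cand = int(ch * 3)
--             if best is None or cand > best:
--                 best = cand
--         p2, p1 = p1, ch
--     return -1 if best is None else best
-- ===== Notes on version B (the rewrite author's own statement) =====
-- stated objective: simpler
-- what changed: A slides a 3-window by index, collects every matching triple into a list, then runs a second max loop over it; B is a single pass over the characters keeping only the two previous characters and a running best, building no intermediate list.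
import Mathlib
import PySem

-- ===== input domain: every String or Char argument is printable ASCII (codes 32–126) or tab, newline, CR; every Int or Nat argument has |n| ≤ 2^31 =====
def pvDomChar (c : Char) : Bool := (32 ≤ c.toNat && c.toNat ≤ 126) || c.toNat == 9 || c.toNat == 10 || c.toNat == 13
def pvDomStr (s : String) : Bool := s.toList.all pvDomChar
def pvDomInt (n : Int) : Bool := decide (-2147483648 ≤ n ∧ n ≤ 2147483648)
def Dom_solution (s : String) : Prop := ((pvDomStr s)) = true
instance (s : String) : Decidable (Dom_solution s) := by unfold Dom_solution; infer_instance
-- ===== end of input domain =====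

-- B replaces A's index-window list collection plus second max pass by a single pass with O(1) state (simpler, no intermediate list).

-- ===== PORT A =====
def is_same_3chars (arr : List Char) (start : Int) : Bool :=
  -- arr[start] == arr[start+1] == arr[start+2]; indices are in range at every call site
  (PySem.List.pyGetD arr start ' ' == PySem.List.pyGetD arr (start + 1) ' ') &&
  (PySem.List.pyGetD arr (start + 1) ' ' == PySem.List.pyGetD arr (start + 2) ' ')

def solution (s : String) : Int :=
  let arr_s := s.toList
  let arr : List (List Char) :=
    (PySem.List.pyRange 0 ((arr_s.length : Int) - 2) 1).foldl
      (fun acc i =>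
        if is_same_3chars arr_s i then acc ++ [PySem.List.slice arr_s (some i) (some (i + 3))]
        else acc) []
  if arr.length = 0 then -1
  else
    -- int(''.join(arr[i])) = PySem.Int.ofChars? on the char list (ValueError excluded by Pre_)
    let answer :=
      (PySem.List.pyRange 0 (arr.length : Int) 1).foldl
        (fun answer i =>
          max answer ((PySem.Int.ofChars? (PySem.List.pyGetD arr i [])).getD 0)) 0
    if answer = 0 then 0 else answer

-- ===== PORT B =====
-- state = (p2, p1, best)
def altStep (st : Option Char × Option Char × Option Int) (ch : Char) :
    Option Char × Option Char × Option Int :=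
  let best :=
    if st.1 == st.2.1 && st.2.1 == some ch then
      let cand := (PySem.Int.ofStr? (String.ofList [ch, ch, ch])).getD 0
      match st.2.2 with
      | none => some cand
      | some b => if cand > b then some cand else some b
    else st.2.2
  (st.2.1, some ch, best)

def solution_alt (s : String) : Int :=
  match (s.toList.foldl altStep (none, none, none)).2.2 with
  | none => -1
  | some b => b

-- ===== PRECONDITION & SPEC =====
-- Pre_ excludes exactly the inputs where int() raises ValueError in A: a window of
-- three equal non-digit characters.
def Pre_solution (s : String) : Prop :=
  ∀ i < s.toList.length, i + 2 < s.toList.length →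
    (s.toList.getD i ' ' = s.toList.getD (i + 1) ' ' ∧
     s.toList.getD (i + 1) ' ' = s.toList.getD (i + 2) ' ') →
    (s.toList.getD i ' ').isDigit = true
instance (s : String) : Decidable (Pre_solution s) := by unfold Pre_solution; infer_instance

def pvWitness_solution : String := "777"

def Spec_solution (s : String) (out : Int) : Prop := out = solution_alt s
instance (s : String) (out : Int) : Decidable (Spec_solution s out) := by unfold Spec_solution; infer_instance

-- ===== CLAIM (what is proved, stated in full; the proofs are below) =====
def Claim_equal_solution : Prop := ∀ (s : String), Dom_solution s → Pre_solution s → Spec_solution s (solution s)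

-- ===== LEMMAS AND PROOFS =====

-- characters of the 3-windows of equal characters, in order
def winChars : List Char → List Char
  | a :: b :: c :: rest => (if a = b ∧ b = c then [a] else []) ++ winChars (b :: c :: rest)
  | _ => []

def pv3 (c : Char) : Int := (PySem.Int.ofChars? [c, c, c]).getD 0

def bestUpd (b : Option Int) (ch : Char) : Option Int :=
  match b with
  | none => some (pv3 ch)
  | some b0 => if pv3 ch > b0 then some (pv3 ch) else some b0

lemma ofStr_mk_three (c : Char) :
    PySem.Int.ofStr? (String.ofList [c, c, c]) = PySem.Int.ofChars? [c, c, c] := by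
  simp [PySem.Int.ofStr?]

lemma digit_mem (c : Char) (h : c.isDigit = true) :
    c ∈ ['0', '1', '2', '3', '4', '5', '6', '7', '8', '9'] := by
  simp [Char.isDigit] at h
  obtain ⟨h1, h2⟩ := h
  have hl : 48 ≤ c.toNat := h1
  have hu : c.toNat ≤ 57 := h2
  have hc : c = Char.ofNat c.toNat := (Char.ofNat_toNat c).symm
  interval_cases hn : c.toNat <;> rw [hc] <;> decide

lemma pv3_nonneg (c : Char) (h : c.isDigit = true) : 0 ≤ pv3 c := by
  have hm := digit_mem c h
  simp only [List.mem_cons, List.not_mem_nil, or_false] at hm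
  rcases hm with rfl | rfl | rfl | rfl | rfl | rfl | rfl | rfl | rfl | rfl <;> decide

-- A's collected window list is the winChars, each blown up to a triple
lemma arr_eq (l : List Char) :
    (PySem.List.pyRange 0 ((l.length : Int) - 2) 1).foldl
      (fun acc i =>
        if is_same_3chars l i then acc ++ [PySem.List.slice l (some i) (some (i + 3))]
        else acc) []
      = (winChars l).map (fun c => [c, c, c]) := by
  rw [PySem.List.foldl_append_if, List.nil_append]
  induction l using winChars.induct with
  | case2 t h =>
      match t, h with
      | [], _ => rfl
      | [a], _ => rfl
      | [a, b], _ => rfl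
      | a :: b :: c :: rest, h => exact (h a b c rest rfl).elim
  | case1 a b c rest ih =>
      have hlen : ((a :: b :: c :: rest).length : Int) - 2 = (rest.length : Int) + 1 := by
        simp; omega
      rw [hlen, PySem.List.pyRange_one_cons (by omega), List.filter_cons]
      have hshift : PySem.List.pyRange (0 + 1) ((rest.length : Int) + 1) 1
          = (PySem.List.pyRange 0 (((b :: c :: rest).length : Int) - 2) 1).map (· + 1) := by
        rw [PySem.List.pyRange_one, PySem.List.pyRange_one]
        have h1 : (((rest.length : Int) + 1) - (0 + 1)).toNat = rest.length := by omega
        have h2 : ((((b :: c :: rest).length : Int) - 2) - 0).toNat = rest.length := by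
          simp; omega
        rw [h1, h2, List.map_map]
        apply List.map_congr_left
        intro k _
        simp
        omega
      have hget : ∀ (i : Int), 0 ≤ i → ∀ (x : Char) (t : List Char),
          PySem.List.pyGetD (x :: t) (i + 1) ' ' = PySem.List.pyGetD t i ' ' := by
        intro i hi x t
        rw [PySem.List.pyGetD_of_nonneg _ _ (by omega), PySem.List.pyGetD_of_nonneg _ _ hi]
        have : (i + 1).toNat = i.toNat + 1 := by omega
        rw [this, List.getD_cons_succ]
      have hcond : ∀ i ∈ PySem.List.pyRange 0 (((b :: c :: rest).length : Int) - 2) 1,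
          is_same_3chars (a :: b :: c :: rest) (i + 1) = is_same_3chars (b :: c :: rest) i := by
        intro i hi
        rw [PySem.List.mem_pyRange_one] at hi
        simp only [is_same_3chars]
        rw [hget i hi.1, show i + 1 + 1 = (i + 1) + 1 by ring, hget (i+1) (by omega),
            show i + 1 + 2 = (i + 2) + 1 by ring, hget (i+2) (by omega)]
      have hslice : ∀ i ∈ PySem.List.pyRange 0 (((b :: c :: rest).length : Int) - 2) 1,
          PySem.List.slice (a :: b :: c :: rest) (some (i + 1)) (some (i + 1 + 3))
            = PySem.List.slice (b :: c :: rest) (some i) (some (i + 3)) := by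
        intro i hi
        rw [PySem.List.mem_pyRange_one] at hi
        rw [PySem.List.slice_toNat _ (by omega) (by omega),
            PySem.List.slice_toNat _ (by omega) (by omega)]
        have e1 : (i + 1).toNat = i.toNat + 1 := by omega
        rw [e1]
        have e2 : (i + 1 + 3).toNat - (i.toNat + 1) = 3 := by omega
        have e3 : (i + 3).toNat - i.toNat = 3 := by omega
        rw [e2, e3, List.drop_succ_cons]
      have htail : ((PySem.List.pyRange (0 + 1) ((rest.length : Int) + 1) 1).filter
            (is_same_3chars (a :: b :: c :: rest))).map
            (fun i => PySem.List.slice (a :: b :: c :: rest) (some i) (some (i + 3)))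
          = (winChars (b :: c :: rest)).map (fun c => [c, c, c]) := by
        rw [hshift, List.filter_map, List.map_map, ← ih]
        have hf : (PySem.List.pyRange 0 (((b :: c :: rest).length : Int) - 2) 1).filter
              ((is_same_3chars (a :: b :: c :: rest)) ∘ (· + 1))
            = (PySem.List.pyRange 0 (((b :: c :: rest).length : Int) - 2) 1).filter
              (is_same_3chars (b :: c :: rest)) := by
          apply List.filter_congr
          intro i hi
          exact hcond i hi
        rw [hf]
        apply List.map_congr_left
        intro i hi
        have := hslice i (List.mem_of_mem_filter hi)
        simpa using this
      have hwin : winChars (a :: b :: c :: rest)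
          = (if a = b ∧ b = c then [a] else []) ++ winChars (b :: c :: rest) := by
        rw [winChars]
      by_cases hc : a = b ∧ b = c
      · have h0 : is_same_3chars (a :: b :: c :: rest) 0 = true := by
          obtain ⟨rfl, rfl⟩ := hc
          simp [is_same_3chars, pysem]
        rw [if_pos h0, hwin, if_pos hc]
        obtain ⟨rfl, rfl⟩ := hc
        simp only [List.map_cons, List.singleton_append]
        rw [htail]
        congr 1
      · have h0 : is_same_3chars (a :: b :: c :: rest) 0 = false := by
          simpa [is_same_3chars, pysem] using hc
        simp only [h0, Bool.false_eq_true, if_false]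
        rw [hwin, if_neg hc]
        simpa using htail

-- B's fold over the tail, two previous chars in hand, is the bestUpd fold over winChars
lemma foldB (l : List Char) (x y : Char) (b : Option Int) :
    (l.foldl altStep (some x, some y, b)).2.2 = (winChars (x :: y :: l)).foldl bestUpd b := by
  induction l generalizing x y b with
  | nil => simp [winChars]
  | cons ch rest ih =>
      have hstep : altStep (some x, some y, b) ch
          = (some y, some ch, if x = y ∧ y = ch then bestUpd b ch else b) := by
        simp only [altStep, bestUpd, ofStr_mk_three]
        by_cases h1 : x = y ∧ y = ch
        · obtain ⟨rfl, rfl⟩ := h1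
          simp [pv3]
        · have h2 : (some x == some y && some y == some ch) = false := by
            simp only [Bool.and_eq_false_iff, beq_eq_false_iff_ne, ne_eq, Option.some.injEq]
            tauto
          simp [h1]
      rw [List.foldl_cons, hstep, ih]
      have hwin : winChars (x :: y :: ch :: rest)
          = (if x = y ∧ y = ch then [x] else []) ++ winChars (y :: ch :: rest) := by
        rw [winChars]
      rw [hwin, List.foldl_append]
      by_cases h1 : x = y ∧ y = ch
      · obtain ⟨rfl, rfl⟩ := h1
        simp
      · simp [h1]

lemma altB (l : List Char) :
    (l.foldl altStep (none, none, none)).2.2 = (winChars l).foldl bestUpd none := by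
  match l with
  | [] => rfl
  | [x] => rfl
  | x :: y :: rest =>
      have h1 : altStep (altStep (none, none, none) x) y = (some x, some y, none) := by
        simp [altStep]
      rw [List.foldl_cons, List.foldl_cons, h1, foldB]

lemma foldl_bestUpd_some (tl : List Char) (b0 : Int) :
    tl.foldl bestUpd (some b0) = some (tl.foldl (fun a ch => max a (pv3 ch)) b0) := by
  induction tl generalizing b0 with
  | nil => rfl
  | cons c tl ih =>
      simp only [List.foldl_cons, bestUpd]
      rcases lt_or_ge b0 (pv3 c) with h | h
      · rw [if_pos h, ih, max_eq_right h.le]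
      · rw [if_neg (not_lt.mpr h), ih, max_eq_left h]

lemma winChars_mem_spec (l : List Char) (c : Char) (hm : c ∈ winChars l) :
    ∃ i, i + 2 < l.length ∧ l.getD i ' ' = l.getD (i + 1) ' ' ∧
      l.getD (i + 1) ' ' = l.getD (i + 2) ' ' ∧ c = l.getD i ' ' := by
  induction l using winChars.induct with
  | case2 t h =>
      exfalso
      match t, h with
      | [], _ => simp [winChars] at hm
      | [a], _ => simp [winChars] at hm
      | [a, b], _ => simp [winChars] at hm
      | a :: b :: d :: rest, h => exact (h a b d rest rfl).elim
  | case1 a b d rest ih =>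
      rw [winChars, List.mem_append] at hm
      rcases hm with hm | hm
      · by_cases hc : a = b ∧ b = d
        · rw [if_pos hc] at hm
          simp at hm
          subst hm
          exact ⟨0, by simp, by simpa using hc.1, by simpa using hc.2, rfl⟩
        · rw [if_neg hc] at hm
          simp at hm
      · obtain ⟨i, hlen, h1, h2, h3⟩ := ih hm
        exact ⟨i + 1, by simp only [List.length_cons] at hlen ⊢; omega,
          by simpa using h1, by simpa using h2, by simpa using h3⟩

-- ===== VERDICT (by name: the statement is the Claim_ definition above) =====
theorem solution_spec : Claim_equal_solution := by
  intro s _ hpre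
  unfold Spec_solution solution solution_alt
  simp only [arr_eq, altB]
  rcases hws : winChars s.toList with _ | ⟨c, tl⟩
  · simp
  · have hd : ∀ ch ∈ winChars s.toList, ch.isDigit = true := by
      intro ch hm
      obtain ⟨i, hlen, h1, h2, h3⟩ := winChars_mem_spec _ _ hm
      rw [h3]
      exact hpre i (by omega) hlen ⟨h1, h2⟩
    rw [if_neg (show ¬((c :: tl).map (fun ch => [ch, ch, ch])).length = 0 by simp)]
    rw [PySem.List.foldl_pyRange_zero_pyGetD' ((c :: tl).map (fun ch => [ch, ch, ch])) []
      (fun answer v => max answer ((PySem.Int.ofChars? v).getD 0)) 0]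
    rw [List.foldl_map, List.foldl_cons, List.foldl_cons]
    have h0 : max 0 ((PySem.Int.ofChars? [c, c, c]).getD 0) = pv3 c := by
      have := pv3_nonneg c (hd c (by rw [hws]; exact List.mem_cons_self))
      simp only [pv3] at this ⊢
      omega
    rw [h0]
    have hupd : bestUpd none c = some (pv3 c) := rfl
    rw [hupd, foldl_bestUpd_some]
    simp only [pv3]
    split <;> omega
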